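-- pv_equiv track=rewrite | github.com/Sherouz/80-days-of-challenges | scripts/filter_balanced_numbers.py | filter_balanced_numbers
-- ===== SOURCE A (Python) =====
-- from typing import Iterable, List
--
-- def count_even_odd_digits(num: int) -> tuple[int, int]:
--     """
--     Return a tuple (even_count, odd_count) for the given integer.
--     Handles negative numbers by ignoring the minus sign.
--     """
--     even = 0
--     odd = 0
--
--     for digit in str(abs(num)):     # abs to ignore negative sign
--         d = ord(digit) - 48         # faster than int(digit), still readable
--         if d % 2 == 0:
--             even += 1
--         else:
--             odd += 1
--
--     return even, odd
--
-- def is_balanced_number(num: int) -> bool: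
--     """
--     Return True if even digit count equals odd digit count.
--     """
--     # Count the number of even and odd digits in `num`
--     even_count, odd_count = count_even_odd_digits(num)
--     # Return True if the number of even digits equals the number of odd digits
--     return even_count == odd_count
--
-- def filter_balanced_numbers(numbers: Iterable[int]) -> List[int]:
--     """
--     Return a list of balanced numbers from any iterable of integers.
--     Raises a ValueError if elements are not integers.
--     """
--     result = []  # Empty list to store numbers that are balanced
--
--     for n in numbers:  # Iterate over each element in the input list
--         if not isinstance(n, int):  # If the element is not an integer, it's invalid
--             raise ValueError(f"Invalid element detected: {n} (expected int)")  # Raise an error for invalid input types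
--
--         if is_balanced_number(n):  # Check whether the current number is balanced
--             result.append(n)  # If balanced, add it to the result list
--
--     return result  # Return the list of all balanced numbers found
-- ===== SOURCE B (Python) =====
-- from typing import Iterable, List
--
-- def filter_balanced_numbers(numbers: Iterable[int]) -> List[int]:
--     """
--     Return a list of balanced numbers (equal even/odd digit counts) from any
--     iterable of integers, extracting digits arithmetically instead of via str().
--     Raises a ValueError if elements are not integers.
--     """
--     result = []
--     for n in numbers:
--         if not isinstance(n, int):
--             raise ValueError(f"Invalid element detected: {n} (expected int)")
--         m = abs(n)
--         net = 0  # +1 per even digit, -1 per odd digit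
--         while True:
--             net += 1 if (m % 10) % 2 == 0 else -1
--             m //= 10
--             if m == 0:
--                 break
--         if net == 0:
--             result.append(n)
--     return result
-- ===== Notes on version B (the rewrite author's own statement) =====
-- stated objective: alternative
-- what changed: B replaces the str(abs(n))/ord-based per-character even-odd pair counting with an arithmetic do-while digit-extraction loop (m % 10, m //= 10) maintaining a single net counter (+1 even, -1 odd), balanced iff net == 0.
import Mathlib
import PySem

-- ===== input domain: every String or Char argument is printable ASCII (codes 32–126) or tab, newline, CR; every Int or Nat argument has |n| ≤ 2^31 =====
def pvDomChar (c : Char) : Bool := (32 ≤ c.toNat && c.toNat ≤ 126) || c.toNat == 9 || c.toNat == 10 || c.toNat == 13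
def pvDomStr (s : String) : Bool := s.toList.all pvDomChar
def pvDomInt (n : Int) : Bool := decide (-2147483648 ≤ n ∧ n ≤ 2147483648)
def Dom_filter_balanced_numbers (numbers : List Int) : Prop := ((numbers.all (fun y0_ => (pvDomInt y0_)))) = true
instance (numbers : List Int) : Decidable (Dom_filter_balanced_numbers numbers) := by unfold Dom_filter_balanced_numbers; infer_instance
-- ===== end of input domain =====

-- B replaces A's str(abs(n))-based even/odd pair counting with an arithmetic
-- do-while digit-extraction loop keeping one net counter (alternative algorithm).

-- ===== PORT A =====
-- for digit in str(abs(num)): d = ord(digit) - 48; count even/odd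
def count_even_odd_digits (num : Int) : Int × Int :=
  (PySem.Int.toStr ((num.natAbs : Int))).toList.foldl
    (fun (p : Int × Int) (digit : Char) =>
      let d : Int := (digit.toNat : Int) - 48
      if PySem.Int.mod d 2 = 0 then (p.1 + 1, p.2) else (p.1, p.2 + 1))
    (0, 0)

def is_balanced_number (num : Int) : Bool :=
  let p := count_even_odd_digits num
  p.1 == p.2

def filter_balanced_numbers (numbers : List Int) : List Int :=
  -- the isinstance check never fires on List Int
  numbers.foldl (fun result n => if is_balanced_number n then result ++ [n] else result) []

-- ===== PORT B =====
-- the do-while loop of Source B on m = abs(n); m is a natural number, so Python's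
-- `% 10` and `//= 10` are exactly Nat mod / Nat division here
def pvNet (m : Nat) : Int :=
  let step : Int := if m % 10 % 2 = 0 then 1 else -1
  if h : m / 10 = 0 then step else step + pvNet (m / 10)
termination_by m
decreasing_by
  exact Nat.div_lt_self (Nat.pos_of_ne_zero (fun h0 => h (by simp [h0]))) (by norm_num)

def filter_balanced_numbers_alt (numbers : List Int) : List Int :=
  numbers.foldl (fun result n => if pvNet n.natAbs == 0 then result ++ [n] else result) []

-- ===== PRECONDITION & SPEC =====
def Spec_filter_balanced_numbers (numbers : List Int) (out : List Int) : Prop := out = filter_balanced_numbers_alt numbers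
instance (numbers : List Int) (out : List Int) : Decidable (Spec_filter_balanced_numbers numbers out) := by unfold Spec_filter_balanced_numbers; infer_instance

-- ===== CLAIM (what is proved, stated in full; the proofs are below) =====
def Claim_equal_filter_balanced_numbers : Prop := ∀ (numbers : List Int), Dom_filter_balanced_numbers numbers → Spec_filter_balanced_numbers numbers (filter_balanced_numbers numbers)

-- ===== LEMMAS AND PROOFS =====

-- structural characterisation of Nat.toDigits 10 (A iterates over these chars)
def pvChars (m : Nat) : List Char :=
  if h : m / 10 = 0 then [Nat.digitChar (m % 10)]
  else pvChars (m / 10) ++ [Nat.digitChar (m % 10)]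
termination_by m
decreasing_by
  exact Nat.div_lt_self (Nat.pos_of_ne_zero (fun h0 => h (by simp [h0]))) (by norm_num)

lemma pv_toDigitsCore (m : Nat) : ∀ (f : Nat) (l : List Char), m < f →
    Nat.toDigitsCore 10 f m l = pvChars m ++ l := by
  induction m using Nat.strong_induction_on with
  | _ m ih =>
    intro f l hf
    match f with
    | 0 => omega
    | f + 1 =>
      rw [Nat.toDigitsCore]
      by_cases h : m / 10 = 0
      · simp [h, pvChars]
      · have hm : 0 < m := Nat.pos_of_ne_zero (fun h0 => h (by simp [h0]))
        have hlt : m / 10 < m := Nat.div_lt_self hm (by norm_num)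
        rw [if_neg h, ih (m / 10) hlt f _ (by omega)]
        conv_rhs => rw [pvChars]
        rw [dif_neg h]
        simp

lemma pv_toChars_eq (m : Nat) : PySem.Int.toChars (m : Int) = pvChars m := by
  have : PySem.Int.toChars (m : Int) = Nat.toDigits 10 m := by
    simp [PySem.Int.toChars]
  rw [this, Nat.toDigits, pv_toDigitsCore m (m + 1) [] (by omega), List.append_nil]

-- the per-character ±1 step of A, and its sum over a char list
def pvStep (c : Char) : Int :=
  if PySem.Int.mod ((c.toNat : Int) - 48) 2 = 0 then 1 else -1

def pvLNet : List Char → Int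
  | [] => 0
  | c :: cs => pvStep c + pvLNet cs

lemma pvLNet_append (l1 l2 : List Char) : pvLNet (l1 ++ l2) = pvLNet l1 + pvLNet l2 := by
  induction l1 with
  | nil => simp [pvLNet]
  | cons c cs ih => simp [pvLNet, ih]; ring

lemma pv_foldl_diff (l : List Char) : ∀ (p : Int × Int),
    ((l.foldl (fun (p : Int × Int) (digit : Char) =>
      let d : Int := (digit.toNat : Int) - 48
      if PySem.Int.mod d 2 = 0 then (p.1 + 1, p.2) else (p.1, p.2 + 1)) p).1 -
     (l.foldl (fun (p : Int × Int) (digit : Char) =>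
      let d : Int := (digit.toNat : Int) - 48
      if PySem.Int.mod d 2 = 0 then (p.1 + 1, p.2) else (p.1, p.2 + 1)) p).2)
    = p.1 - p.2 + pvLNet l := by
  induction l with
  | nil => intro p; simp [pvLNet]
  | cons c cs ih =>
    intro p
    simp only [List.foldl_cons, pvLNet]
    rw [ih]
    simp [pvStep]
    split_ifs <;> simp <;> omega

lemma pvStep_digitChar (d : Nat) (h : d < 10) :
    pvStep (Nat.digitChar d) = if d % 2 = 0 then 1 else -1 := by
  interval_cases d <;> decide

lemma pvLNet_pvChars (m : Nat) : pvLNet (pvChars m) = pvNet m := by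
  induction m using Nat.strong_induction_on with
  | _ m ih =>
    rw [pvChars, pvNet]
    by_cases h : m / 10 = 0
    · simp [h, pvLNet, pvStep_digitChar (m % 10) (Nat.mod_lt _ (by norm_num))]
    · have hm : 0 < m := Nat.pos_of_ne_zero (fun h0 => h (by simp [h0]))
      rw [dif_neg h, pvLNet_append, ih (m / 10) (Nat.div_lt_self hm (by norm_num))]
      simp [h, pvLNet, pvStep_digitChar (m % 10) (Nat.mod_lt _ (by norm_num))]
      ring

lemma pv_balanced_eq (n : Int) : is_balanced_number n = (pvNet n.natAbs == 0) := by
  have hd : (count_even_odd_digits n).1 - (count_even_odd_digits n).2 = pvNet n.natAbs := by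
    unfold count_even_odd_digits
    rw [PySem.Int.toList_toStr, pv_toChars_eq, pv_foldl_diff]
    simp [pvLNet_pvChars]
  rw [Bool.eq_iff_iff]
  simp only [is_balanced_number, beq_iff_eq]
  omega

-- ===== VERDICT (by name: the statement is the Claim_ definition above) =====
theorem filter_balanced_numbers_spec : Claim_equal_filter_balanced_numbers := by
  intro numbers _
  unfold Spec_filter_balanced_numbers filter_balanced_numbers filter_balanced_numbers_alt
  simp only [pv_balanced_eq]
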